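-- pv_equiv track=rewrite | github.com/shoyu-ramen/ProofRead | backend/app/services/sensor_check.py | _aggregate_verdict
-- ===== SOURCE A (Python) =====
-- from typing import Literal
--
-- Verdict = Literal["good", "degraded", "unreadable"]
--
-- def _aggregate_verdict(verdicts: list[Verdict]) -> Verdict:
--     if not verdicts:
--         return "unreadable"
--     if any(v == "unreadable" for v in verdicts):
--         return "unreadable"
--     if any(v == "degraded" for v in verdicts):
--         return "degraded"
--     return "good"
-- ===== SOURCE B (Python) =====
-- _RANK = {"good": 0, "degraded": 1, "unreadable": 2}
-- _BY_RANK = ("good", "degraded", "unreadable")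
--
-- def _aggregate_verdict(verdicts):
--     if not verdicts:
--         return "unreadable"
--     worst = max(_RANK.get(v, 0) for v in verdicts)
--     return _BY_RANK[worst]
-- ===== Notes on version B (the rewrite author's own statement) =====
-- stated objective: alternative
-- what changed: Replaces the two short-circuiting any-scans over the list by a severity ranking (good=0, degraded=1, unreadable=2): one pass computes the maximum rank and maps it back to its verdict string.
import Mathlib
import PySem

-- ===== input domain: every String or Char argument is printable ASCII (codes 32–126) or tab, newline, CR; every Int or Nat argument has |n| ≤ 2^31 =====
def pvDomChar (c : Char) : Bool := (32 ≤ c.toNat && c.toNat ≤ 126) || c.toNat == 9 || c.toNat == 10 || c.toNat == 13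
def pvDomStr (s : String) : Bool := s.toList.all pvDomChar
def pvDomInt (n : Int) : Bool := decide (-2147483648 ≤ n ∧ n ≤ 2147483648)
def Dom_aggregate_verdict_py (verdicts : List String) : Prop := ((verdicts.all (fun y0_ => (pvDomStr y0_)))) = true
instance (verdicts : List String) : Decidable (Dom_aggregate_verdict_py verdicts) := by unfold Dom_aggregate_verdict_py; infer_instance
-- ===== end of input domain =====

-- B replaces A's two short-circuiting any-scans by a single max over a severity ranking mapped back to the verdict string (alternative decomposition, same cost).


-- ===== PORT A =====
def aggregate_verdict_py (verdicts : List String) : String :=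
  if verdicts = [] then "unreadable"
  else if verdicts.any (fun v => v == "unreadable") then "unreadable"
  else if verdicts.any (fun v => v == "degraded") then "degraded"
  else "good"

-- ===== PORT B =====
-- _RANK.get(v, 0)
def pvRank (v : String) : Nat :=
  (PySem.Dict.getD (PySem.Dict.ofList [("good", 0), ("degraded", 1), ("unreadable", 2)]) v 0)
-- _BY_RANK[worst]
def pvByRank (r : Nat) : String :=
  (PySem.List.pyGet? ["good", "degraded", "unreadable"] (Int.ofNat r)).getD ""

def aggregate_verdict_py_alt (verdicts : List String) : String :=
  if verdicts = [] then "unreadable"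
  else
    let worst := verdicts.foldl (fun m v => max m (pvRank v)) 0
    pvByRank worst

-- ===== PRECONDITION & SPEC =====
def Spec_aggregate_verdict_py (verdicts : List String) (out : String) : Prop := out = aggregate_verdict_py_alt verdicts
instance (verdicts : List String) (out : String) : Decidable (Spec_aggregate_verdict_py verdicts out) := by unfold Spec_aggregate_verdict_py; infer_instance

-- ===== CLAIM (what is proved, stated in full; the proofs are below) =====
def Claim_equal_aggregate_verdict_py : Prop := ∀ (verdicts : List String), Dom_aggregate_verdict_py verdicts → Spec_aggregate_verdict_py verdicts (aggregate_verdict_py verdicts)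

-- ===== LEMMAS AND PROOFS =====

-- the worst rank, expressed through the two any-scans
def pvW (l : List String) : Nat :=
  if l.any (fun v => v == "unreadable") then 2
  else if l.any (fun v => v == "degraded") then 1
  else 0

theorem pvRank_eq (v : String) :
    pvRank v = (if v == "unreadable" then 2 else if v == "degraded" then 1 else 0) := by
  by_cases hu : v = "unreadable"
  · subst hu; decide
  by_cases hd : v = "degraded"
  · subst hd; decide
  by_cases hg : v = "good"
  · subst hg; decide
  have g1 : ("good" == v) = false := by simp [beq_eq_false_iff_ne]; exact Ne.symm hg
  have g2 : ("degraded" == v) = false := by simp [beq_eq_false_iff_ne]; exact Ne.symm hd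
  have g3 : ("unreadable" == v) = false := by simp [beq_eq_false_iff_ne]; exact Ne.symm hu
  simp [pvRank, PySem.Dict.getD, PySem.Dict.get?, PySem.Dict.ofList,
    PySem.Dict.empty, PySem.Dict.update, PySem.Dict.insert,
    List.find?, g1, g2, g3, hu, hd]

theorem pvFoldl_eq (l : List String) (acc : Nat) :
    l.foldl (fun m v => max m (pvRank v)) acc = max acc (pvW l) := by
  induction l generalizing acc with
  | nil => simp [pvW]
  | cons v t ih =>
    rw [List.foldl_cons, ih]
    simp only [pvRank_eq, beq_iff_eq]
    by_cases hu : v = "unreadable" <;> by_cases hd : v = "degraded" <;>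
      by_cases h1 : (t.any (fun v => v == "unreadable")) = true <;>
      by_cases h2 : (t.any (fun v => v == "degraded")) = true <;>
      simp_all [pvW, List.any_cons]

theorem aggregate_verdict_py_spec : Claim_equal_aggregate_verdict_py := by
  intro verdicts _
  show aggregate_verdict_py verdicts = aggregate_verdict_py_alt verdicts
  unfold aggregate_verdict_py aggregate_verdict_py_alt
  by_cases h : verdicts = []
  · simp [h]
  · simp only [h, if_false, pvFoldl_eq, Nat.zero_max]
    unfold pvW
    split_ifs <;> simp [pvByRank, PySem.List.pyGet?, PySem.List.pyIdx?]
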